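-- pv_equiv track=rewrite | github.com/PowerLichen/CodeTest | Python/5639.py | solution
-- ===== SOURCE A (Python) =====
-- def solution(nums):
--     length = len(nums)
--     if length <= 1:
--         return nums
--
--     for i in range(1,length):
--         if nums[i] > nums[0]:
--             return solution(nums[1:i]) + solution(nums[i:]) + [nums[0]]
--
--     return solution(nums[1:]) + [nums[0]]
-- ===== SOURCE B (Python) =====
-- def solution(nums):
--     n = len(nums)
--     out = []
--     stack = []        # suspended frames: (enclosing bound, pending roots)
--     bound = None      # values admitted while <= bound (None = no bound)
--     roots = []        # roots of the trees parsed so far in the current run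
--     i = 0
--     while True:
--         if i < n and (bound is None or nums[i] <= bound):
--             r = nums[i]
--             roots.append(r)
--             stack.append((bound, roots))   # suspend this run, descend into r's left run
--             bound = r
--             roots = []
--             i += 1
--         else:
--             out.extend(reversed(roots))    # run finished: emit its roots, deepest-first
--             if not stack:
--                 break
--             bound, roots = stack.pop()
--     return out
-- ===== Notes on version B (the rewrite author's own statement) =====
-- stated objective: faster
-- what changed: Replaced the slice-and-rescan recursion (repeated list slicing and a linear split search at every node) by a single-pass recursive parser over an index pointer with an upper value bound, emitting into one output list.
import Mathlib
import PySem

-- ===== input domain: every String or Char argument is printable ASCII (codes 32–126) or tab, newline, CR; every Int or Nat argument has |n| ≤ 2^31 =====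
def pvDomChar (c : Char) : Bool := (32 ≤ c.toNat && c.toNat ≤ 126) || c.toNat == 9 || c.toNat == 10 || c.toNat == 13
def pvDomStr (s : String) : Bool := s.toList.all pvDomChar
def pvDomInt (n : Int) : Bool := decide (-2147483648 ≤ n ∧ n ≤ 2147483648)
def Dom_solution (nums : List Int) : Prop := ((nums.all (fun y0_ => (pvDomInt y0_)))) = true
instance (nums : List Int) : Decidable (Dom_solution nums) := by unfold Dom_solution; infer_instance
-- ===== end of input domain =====

-- B replaces A's slice-and-rescan recursion by a single left-to-right pass with an explicit frame stack of value bounds.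

-- ===== PORT A =====
-- the for-loop 'for i in range(1,length): if nums[i] > nums[0]: return …' scans the tail
-- for the first element > nums[0]; splitIdxA counts the leading tail elements ≤ r, which is
-- exactly i-1 at the loop's return (or the whole tail length if the loop falls through).
def splitIdxA (r : Int) : List Int → Nat
  | [] => 0
  | x :: xs => if x > r then 0 else splitIdxA r xs + 1

def solution (nums : List Int) : List Int :=
  if nums.length ≤ 1 then nums
  else
    match nums with
    | [] => []   -- unreachable: length ≥ 2
    | x :: xs =>
      let k := splitIdxA x xs   -- loop found nums[k+1] > nums[0] iff k < xs.length
      if k < xs.length then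
        solution (xs.take k) ++ solution (xs.drop k) ++ [x]   -- nums[1:i] and nums[i:], i = k+1
      else
        solution xs ++ [x]
termination_by nums.length
decreasing_by
  all_goals simp

-- ===== PORT B =====
-- pB bound x: 'bound is None or x <= bound' — the admission test of the while loop
def pB (bound : Option Int) (x : Int) : Bool :=
  match bound with | none => true | some b => decide (x ≤ b)

-- the while-True loop of B, state (i, bound, roots, stack, out); fuel only makes it
-- total (2*n+1 steps always suffice, proved below); 'out.extend(reversed(roots))' is
-- 'out ++ roots.reverse', 'stack.append/pop' is cons/head on a frame list.
def loopB (nums : List Int) (n : Nat) :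
    Nat → Nat → Option Int → List Int → List (Option Int × List Int) → List Int → List Int
  | 0, _, _, _, _, out => out
  | fuel + 1, i, bound, roots, stack, out =>
    if i < n ∧ pB bound (nums.getD i 0) = true then
      loopB nums n fuel (i + 1) (some (nums.getD i 0)) []
        ((bound, roots ++ [nums.getD i 0]) :: stack) out
    else
      match stack with
      | [] => out ++ roots.reverse
      | (b', rs') :: st => loopB nums n fuel i b' rs' st (out ++ roots.reverse)

def solution_alt (nums : List Int) : List Int :=
  loopB nums nums.length (2 * nums.length + 1) 0 none [] [] []

-- ===== PRECONDITION & SPEC =====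
def Spec_solution (nums : List Int) (out : List Int) : Prop := out = solution_alt nums
instance (nums : List Int) (out : List Int) : Decidable (Spec_solution nums out) := by unfold Spec_solution; infer_instance

-- ===== CLAIM (what is proved, stated in full; the proofs are below) =====
def Claim_equal_solution : Prop := ∀ (nums : List Int), Dom_solution nums → Spec_solution nums (solution nums)

-- ===== LEMMAS AND PROOFS =====

theorem solution_nil : solution [] = [] := by simp [solution]

-- the maximal run of admitted values starting at i
def runOf (nums : List Int) (i : Nat) (b : Option Int) : List Int :=
  (nums.drop i).takeWhile (pB b)

-- denotation of a suspended stack: what the loop will still emit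
def K (nums : List Int) : List (Option Int × List Int) → Nat → Option Int → List Int → List Int
  | [], i, b, roots => solution (runOf nums i b) ++ roots.reverse
  | (b', rs') :: st, i, b, roots =>
    solution (runOf nums i b) ++ roots.reverse ++
      K nums st (i + (runOf nums i b).length) b' rs'

theorem splitIdxA_append (r : Int) (tl tr : List Int)
    (h1 : ∀ x ∈ tl, x ≤ r) (h2 : tr = [] ∨ ∃ y ys, tr = y :: ys ∧ r < y) :
    splitIdxA r (tl ++ tr) = tl.length := by
  induction tl with
  | nil =>
    rcases h2 with h | ⟨y, ys, rfl, hy⟩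
    · simp [h, splitIdxA]
    · simp [splitIdxA, hy]
  | cons a as ih =>
    have ha : a ≤ r := h1 a (by simp)
    simp [splitIdxA, not_lt.mpr ha, ih (fun x hx => h1 x (by simp [hx]))]

-- A on a root r followed by its left block (all ≤ r) and right block (empty or head > r)
theorem solution_split (r : Int) (tl tr : List Int)
    (h1 : ∀ x ∈ tl, x ≤ r) (h2 : tr = [] ∨ ∃ y ys, tr = y :: ys ∧ r < y) :
    solution (r :: (tl ++ tr)) = solution tl ++ solution tr ++ [r] := by
  rw [solution]
  by_cases hlen : (r :: (tl ++ tr)).length ≤ 1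
  · have : tl = [] ∧ tr = [] := by
      constructor <;> [cases tl; cases tr] <;> simp_all
    obtain ⟨rfl, rfl⟩ := this
    simp [solution_nil]
  · simp only [if_neg hlen]
    have hk : splitIdxA r (tl ++ tr) = tl.length := splitIdxA_append r tl tr h1 h2
    rcases h2 with rfl | ⟨y, ys, rfl, hy⟩
    · have hk' : splitIdxA r tl = tl.length := by simpa using hk
      simp [hk', solution_nil]
    · simp [hk, List.take_left', List.drop_left']

-- the implication q ≤ p lets takeWhile split at takeWhile q's end
theorem takeWhile_split {α : Type} (p q : α → Bool) (xs : List α)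
    (h : ∀ x, q x = true → p x = true) :
    xs.takeWhile p = xs.takeWhile q ++ (xs.drop (xs.takeWhile q).length).takeWhile p := by
  induction xs with
  | nil => simp
  | cons a as ih =>
    by_cases hq : q a = true
    · simp [hq, h a hq, ih]
    · simp [List.takeWhile_cons, hq]

-- a rejected (or absent) head makes the run empty
theorem run_empty (nums : List Int) (i : Nat) (b : Option Int)
    (h : ¬(i < nums.length ∧ pB b (nums.getD i 0) = true)) :
    runOf nums i b = [] := by
  by_cases hi : i < nums.length
  · have hget : nums.getD i 0 = nums[i] := by
      simp [List.getD_eq_getElem?_getD, List.getElem?_eq_getElem hi]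
    have hp : ¬ pB b nums[i] = true := fun hp => h ⟨hi, by rw [hget]; exact hp⟩
    rw [runOf, List.drop_eq_getElem_cons hi, List.takeWhile_cons, if_neg hp]
  · rw [runOf, List.drop_eq_nil_of_le (by omega)]; rfl

-- an admitted head r splits its run into r, the left run (bound r), the rest (bound b),
-- and A's postorder of the run is left-post ++ rest-post ++ [r]
theorem run_decomp (nums : List Int) (i : Nat) (b : Option Int)
    (hi : i < nums.length) (hp : pB b nums[i] = true) :
    runOf nums i b =
      nums[i] :: (runOf nums (i + 1) (some nums[i]) ++
        runOf nums (i + 1 + (runOf nums (i + 1) (some nums[i])).length) b) ∧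
    solution (runOf nums i b) =
      solution (runOf nums (i + 1) (some nums[i])) ++
        solution (runOf nums (i + 1 + (runOf nums (i + 1) (some nums[i])).length) b) ++
        [nums[i]] := by
  have hdrop : nums.drop i = nums[i] :: nums.drop (i + 1) := List.drop_eq_getElem_cons hi
  set r := nums[i] with hr
  set tl := ((nums.drop (i + 1)).takeWhile (pB (some r))) with htl
  set tr := ((nums.drop (i + 1 + tl.length)).takeWhile (pB b)) with htr
  have himp : ∀ x, pB (some r) x = true → pB b x = true := by
    intro x hx
    cases b with
    | none => simp [pB]
    | some c =>
      simp [pB] at hx ⊢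
      have hrb : r ≤ c := by simpa [pB] using hp
      omega
  have hsplit : (nums.drop (i + 1)).takeWhile (pB b) = tl ++ tr := by
    rw [takeWhile_split (pB b) (pB (some r)) _ himp, ← htl]
    congr 1
    rw [htr, List.drop_drop]
  have htl_all : ∀ x ∈ tl, x ≤ r := by
    intro x hx
    have := List.mem_takeWhile_imp hx
    simpa [pB] using this
  have hsuffix : nums.drop (i + 1 + tl.length) =
      (nums.drop (i + 1)).dropWhile (pB (some r)) := by
    have h1 : nums.drop (i + 1 + tl.length) = (nums.drop (i + 1)).drop tl.length := by
      rw [List.drop_drop]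
    have h2 := List.takeWhile_append_dropWhile (p := pB (some r)) (l := nums.drop (i + 1))
    rw [h1]
    calc (nums.drop (i + 1)).drop tl.length
        = ((nums.drop (i + 1)).takeWhile (pB (some r)) ++
            (nums.drop (i + 1)).dropWhile (pB (some r))).drop tl.length := by rw [h2]
      _ = (nums.drop (i + 1)).dropWhile (pB (some r)) := by
          rw [← htl]; exact List.drop_left
  have htr_shape : tr = [] ∨ ∃ y ys, tr = y :: ys ∧ r < y := by
    rcases htreq : tr with _ | ⟨y, ys⟩
    · exact Or.inl rfl
    · right
      refine ⟨y, ys, rfl, ?_⟩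
      have htr' : ((nums.drop (i + 1)).dropWhile (pB (some r))).takeWhile (pB b)
          = y :: ys := by rw [← hsuffix, ← htr, htreq]
      have hDne : (nums.drop (i + 1)).dropWhile (pB (some r)) ≠ [] := by
        intro hnil; rw [hnil] at htr'; simp at htr'
      obtain ⟨z, zs, hzzs⟩ := List.exists_cons_of_ne_nil hDne
      have hyz : y = z := by
        rw [hzzs, List.takeWhile_cons] at htr'
        by_cases hz : pB b z = true
        · rw [if_pos hz] at htr'
          exact (List.cons.injEq _ _ _ _ ▸ htr').1.symm
        · rw [if_neg hz] at htr'; cases htr'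
      have hqz : pB (some r) z = false := by
        simpa [hzzs] using
          List.head_dropWhile_not (pB (some r)) (l := nums.drop (i + 1)) hDne
      simp [pB] at hqz
      omega
  have hrun : runOf nums i b = r :: (tl ++ tr) := by
    rw [runOf, hdrop, List.takeWhile_cons, if_pos hp, hsplit]
  refine ⟨by rw [hrun]; rfl, ?_⟩
  rw [hrun]
  exact solution_split r tl tr htl_all htr_shape

-- pushing an admitted head into a new frame preserves the stack denotation
theorem K_step (nums : List Int) (st : List (Option Int × List Int)) (i : Nat)
    (b : Option Int) (roots : List Int) (hi : i < nums.length) (hp : pB b nums[i] = true) :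
    K nums st i b roots =
      K nums ((b, roots ++ [nums[i]]) :: st) (i + 1) (some nums[i]) [] := by
  obtain ⟨hrun, hsol⟩ := run_decomp nums i b hi hp
  have hlen : (runOf nums i b).length =
      1 + (runOf nums (i + 1) (some nums[i])).length +
        (runOf nums (i + 1 + (runOf nums (i + 1) (some nums[i])).length) b).length := by
    rw [hrun]; simp; omega
  cases st with
  | nil => rw [K, K, K, hsol]; simp
  | cons f st' =>
    obtain ⟨b2, rs2⟩ := f
    rw [K, K, K, hsol]
    have hidx : i + 1 + (runOf nums (i + 1) (some nums[i])).length +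
        (runOf nums (i + 1 + (runOf nums (i + 1) (some nums[i])).length) b).length =
        i + (runOf nums i b).length := by omega
    rw [hidx]
    simp

-- unfolding lemma for one loop step (the match on fuel+1 reduces by rfl)
theorem loopB_succ (nums : List Int) (n fuel i : Nat) (bound : Option Int)
    (roots : List Int) (stack : List (Option Int × List Int)) (out : List Int) :
    loopB nums n (fuel + 1) i bound roots stack out =
      if i < n ∧ pB bound (nums.getD i 0) = true then
        loopB nums n fuel (i + 1) (some (nums.getD i 0)) []
          ((bound, roots ++ [nums.getD i 0]) :: stack) out
      else
        match stack with
        | [] => out ++ roots.reverse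
        | (b', rs') :: st => loopB nums n fuel i b' rs' st (out ++ roots.reverse) := rfl

-- main loop invariant: with enough fuel the loop emits out ++ K stack i bound roots
theorem loopB_spec (nums : List Int) (fuel i : Nat) (bound : Option Int)
    (roots : List Int) (stack : List (Option Int × List Int)) (out : List Int)
    (hf : 2 * (nums.length - i) + stack.length + 1 ≤ fuel) (hi : i ≤ nums.length) :
    loopB nums nums.length fuel i bound roots stack out =
      out ++ K nums stack i bound roots := by
  induction fuel generalizing i bound roots stack out with
  | zero => omega
  | succ fuel ih =>
    by_cases hc : i < nums.length ∧ pB bound (nums.getD i 0) = true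
    · obtain ⟨hilt, hpd⟩ := hc
      have hget : nums.getD i 0 = nums[i] := by
        simp [List.getD_eq_getElem?_getD, List.getElem?_eq_getElem hilt]
      have hp : pB bound nums[i] = true := by rw [← hget]; exact hpd
      rw [loopB_succ, if_pos ⟨hilt, hpd⟩, hget,
        ih (i + 1) (some nums[i]) [] ((bound, roots ++ [nums[i]]) :: stack) out
          (by simp only [List.length_cons]; omega) (by omega),
        K_step nums stack i bound roots hilt hp]
    · have hre : runOf nums i bound = [] := run_empty nums i bound hc
      rw [loopB_succ, if_neg hc]
      cases stack with
      | nil =>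
        show out ++ roots.reverse = out ++ K nums [] i bound roots
        rw [K, hre, solution_nil]; simp
      | cons f st' =>
        obtain ⟨b2, rs2⟩ := f
        show loopB nums nums.length fuel i b2 rs2 st' (out ++ roots.reverse) = _
        rw [ih i b2 rs2 st' (out ++ roots.reverse)
          (by simp only [List.length_cons] at hf; omega) hi, K, hre, solution_nil]
        simp

-- ===== VERDICT (by name: the statement is the Claim_ definition above) =====
theorem solution_spec : Claim_equal_solution := by
  intro nums _
  unfold Spec_solution solution_alt
  rw [loopB_spec nums (2 * nums.length + 1) 0 none [] [] []
    (by simp only [List.length_nil, Nat.sub_zero]; omega) (by omega), K]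
  have h : nums.takeWhile (pB none) = nums := by
    induction nums with
    | nil => rfl
    | cons a as ih => simp [pB]
  simp [runOf, h]
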